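-- pv_equiv track=rewrite | github.com/weilalicia7/datamonitor | ml/fairness_shap_explainer.py | _verdict_for_topk
-- ===== SOURCE A (Python) =====
-- from typing import Dict, List, Optional, Tuple
--
-- def _verdict_for_topk(top_categories: List[str]) -> str:
--     """Given the per-feature categories of the top-k contributors to a
--     disparity, assign a verdict tag."""
--     if any(c == "protected" for c in top_categories):
--         return "bias_direct"
--     has_proxy = any(c == "proxy" for c in top_categories)
--     has_admin = any(c == "administrative" for c in top_categories)
--     all_legit = all(
--         c in ("geographic", "clinical", "temporal", "administrative", "other")
--         for c in top_categories
--     )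
--     if has_proxy:
--         return "legitimate_with_note"
--     if has_admin:
--         # Administrative features (e.g., contact preference) aren't
--         # protected but can be culturally correlated — worth flagging
--         # without accusing the model of direct bias.
--         return "legitimate_with_note"
--     if all_legit:
--         return "legitimate"
--     return "legitimate_with_note"
-- ===== SOURCE B (Python) =====
-- def _severity(c: str) -> int:
--     if c == "protected":
--         return 2
--     if c in ("geographic", "clinical", "temporal", "other"):
--         return 0
--     # "proxy", "administrative", and any unknown category all warrant a note
--     return 1
--
--
-- def _verdict_for_topk(top_categories):
--     sev = 0
--     for c in top_categories:
--         s = _severity(c)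
--         if s > sev:
--             sev = s
--     return ("legitimate", "legitimate_with_note", "bias_direct")[sev]
-- ===== Notes on version B (the rewrite author's own statement) =====
-- stated objective: simpler
-- what changed: Replaces four whole-list any/all scans and an ordered branch chain by a single pass that folds each category's severity (legitimate < note < bias_direct) into a running maximum, then indexes a verdict table.
import Mathlib
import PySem

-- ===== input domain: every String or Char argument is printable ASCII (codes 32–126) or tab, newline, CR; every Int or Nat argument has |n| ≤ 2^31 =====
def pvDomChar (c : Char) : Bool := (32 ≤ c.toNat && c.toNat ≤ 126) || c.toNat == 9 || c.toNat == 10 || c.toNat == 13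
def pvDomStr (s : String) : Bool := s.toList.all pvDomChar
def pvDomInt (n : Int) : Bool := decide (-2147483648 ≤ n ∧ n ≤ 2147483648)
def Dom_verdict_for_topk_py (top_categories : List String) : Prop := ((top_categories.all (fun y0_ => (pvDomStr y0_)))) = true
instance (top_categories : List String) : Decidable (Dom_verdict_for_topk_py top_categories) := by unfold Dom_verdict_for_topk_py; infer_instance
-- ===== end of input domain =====

-- B replaces A's four whole-list any/all scans and ordered branch chain by a single
-- fold to a maximum severity, then a verdict table lookup (objective: simpler).

-- ===== PORT A =====
def verdict_for_topk_py (top_categories : List String) : String :=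
  if top_categories.any (fun c => c = "protected") then "bias_direct"
  else
    let has_proxy := top_categories.any (fun c => c = "proxy")
    let has_admin := top_categories.any (fun c => c = "administrative")
    let all_legit := top_categories.all (fun c =>
      c = "geographic" ∨ c = "clinical" ∨ c = "temporal" ∨ c = "administrative" ∨ c = "other")
    if has_proxy then "legitimate_with_note"
    else if has_admin then "legitimate_with_note"
    else if all_legit then "legitimate"
    else "legitimate_with_note"

-- ===== PORT B =====
def pvSeverity (c : String) : Nat :=
  if c = "protected" then 2
  else if c = "geographic" ∨ c = "clinical" ∨ c = "temporal" ∨ c = "other" then 0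
  else 1

def verdict_for_topk_py_alt (top_categories : List String) : String :=
  let sev := top_categories.foldl (fun sev c =>
    let s := pvSeverity c
    if sev < s then s else sev) 0
  (["legitimate", "legitimate_with_note", "bias_direct"].getD sev "")

-- ===== PRECONDITION & SPEC =====
def Spec_verdict_for_topk_py (top_categories : List String) (out : String) : Prop := out = verdict_for_topk_py_alt top_categories
instance (top_categories : List String) (out : String) : Decidable (Spec_verdict_for_topk_py top_categories out) := by unfold Spec_verdict_for_topk_py; infer_instance

-- ===== CLAIM (what is proved, stated in full; the proofs are below) =====
def Claim_equal_verdict_for_topk_py : Prop := ∀ (top_categories : List String), Dom_verdict_for_topk_py top_categories → Spec_verdict_for_topk_py top_categories (verdict_for_topk_py top_categories)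

-- ===== LEMMAS AND PROOFS =====

theorem pvSeverity_le (c : String) : pvSeverity c ≤ 2 := by
  unfold pvSeverity; split_ifs <;> omega

theorem pvSeverity_eq_two (c : String) : pvSeverity c = 2 ↔ c = "protected" := by
  unfold pvSeverity; split_ifs <;> simp_all

theorem pvSeverity_eq_zero (c : String) :
    pvSeverity c = 0 ↔ (c = "geographic" ∨ c = "clinical" ∨ c = "temporal" ∨ c = "other") := by
  unfold pvSeverity; split_ifs <;> simp_all

theorem pvNatMax_eq_two (a b : Nat) (ha : a ≤ 2) (hb : b ≤ 2) :
    Nat.max a b = 2 ↔ a = 2 ∨ b = 2 := by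
  rcases Nat.le_total a b with h | h
  · rw [show Nat.max a b = b from Nat.max_eq_right h]; omega
  · rw [show Nat.max a b = a from Nat.max_eq_left h]; omega

theorem pvNatMax_eq_zero (a b : Nat) : Nat.max a b = 0 ↔ a = 0 ∧ b = 0 := by
  rcases Nat.le_total a b with h | h
  · rw [show Nat.max a b = b from Nat.max_eq_right h]; omega
  · rw [show Nat.max a b = a from Nat.max_eq_left h]; omega

theorem pvFold_eq_max (tc : List String) (a : Nat) :
    tc.foldl (fun sev c => let s := pvSeverity c; if sev < s then s else sev) a
      = tc.foldl (fun m c => Nat.max m (pvSeverity c)) a := by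
  induction tc generalizing a with
  | nil => rfl
  | cons h t ih =>
    simp only [List.foldl_cons]
    rw [ih]
    congr 1
    by_cases hlt : a < pvSeverity h
    · rw [if_pos hlt]
      exact (show Nat.max a (pvSeverity h) = pvSeverity h from
        Nat.max_eq_right (Nat.le_of_lt hlt)).symm
    · rw [if_neg hlt]
      exact (show Nat.max a (pvSeverity h) = a from
        Nat.max_eq_left (Nat.le_of_not_lt hlt)).symm

theorem pvFold_le (tc : List String) (a : Nat) (ha : a ≤ 2) :
    tc.foldl (fun m c => Nat.max m (pvSeverity c)) a ≤ 2 := by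
  induction tc generalizing a with
  | nil => exact ha
  | cons h t ih =>
    simp only [List.foldl_cons]
    exact ih _ (Nat.max_le.mpr ⟨ha, pvSeverity_le h⟩)

theorem pvFold_eq_two (tc : List String) (a : Nat) (ha : a ≤ 2) :
    tc.foldl (fun m c => Nat.max m (pvSeverity c)) a = 2 ↔
      a = 2 ∨ ∃ c ∈ tc, pvSeverity c = 2 := by
  induction tc generalizing a with
  | nil => simp
  | cons h t ih =>
    simp only [List.foldl_cons, List.mem_cons]
    rw [ih _ (Nat.max_le.mpr ⟨ha, pvSeverity_le h⟩),
        pvNatMax_eq_two a _ ha (pvSeverity_le h)]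
    constructor
    · rintro ((h1 | h1) | ⟨c, hc, h2c⟩)
      · exact Or.inl h1
      · exact Or.inr ⟨h, Or.inl rfl, h1⟩
      · exact Or.inr ⟨c, Or.inr hc, h2c⟩
    · rintro (h1 | ⟨c, (rfl | hc), h2c⟩)
      · exact Or.inl (Or.inl h1)
      · exact Or.inl (Or.inr h2c)
      · exact Or.inr ⟨c, hc, h2c⟩

theorem pvFold_eq_zero (tc : List String) (a : Nat) :
    tc.foldl (fun m c => Nat.max m (pvSeverity c)) a = 0 ↔
      a = 0 ∧ ∀ c ∈ tc, pvSeverity c = 0 := by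
  induction tc generalizing a with
  | nil => simp
  | cons h t ih =>
    simp only [List.foldl_cons, List.mem_cons]
    rw [ih, pvNatMax_eq_zero]
    constructor
    · rintro ⟨⟨ha0, hh0⟩, hall⟩
      exact ⟨ha0, fun c hc => by rcases hc with rfl | hc; exact hh0; exact hall c hc⟩
    · rintro ⟨rfl, hall⟩
      exact ⟨⟨rfl, hall h (Or.inl rfl)⟩, fun c hc => hall c (Or.inr hc)⟩

-- ===== VERDICT (by name: the statement is the Claim_ definition above) =====
theorem verdict_for_topk_py_spec : Claim_equal_verdict_for_topk_py := by
  intro tc _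
  unfold Spec_verdict_for_topk_py verdict_for_topk_py verdict_for_topk_py_alt
  dsimp only
  rw [pvFold_eq_max]
  set F := tc.foldl (fun m c => Nat.max m (pvSeverity c)) 0 with hF
  have hle : F ≤ 2 := pvFold_le tc 0 (by omega)
  have h2 : F = 2 ↔ ∃ c ∈ tc, pvSeverity c = 2 := by
    rw [hF, pvFold_eq_two tc 0 (by omega)]; simp
  have h0 : F = 0 ↔ ∀ c ∈ tc, pvSeverity c = 0 := by
    rw [hF, pvFold_eq_zero]; simp
  by_cases hp : (tc.any fun c => decide (c = "protected")) = true
  · rw [if_pos hp]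
    obtain ⟨c, hc, hcp⟩ := List.any_eq_true.mp hp
    have hcF : F = 2 := h2.mpr ⟨c, hc, (pvSeverity_eq_two c).mpr (by simpa using hcp)⟩
    rw [hcF]; rfl
  · rw [if_neg hp]
    have hnp : ∀ c ∈ tc, c ≠ "protected" := by
      intro c hc hceq
      exact hp (List.any_eq_true.mpr ⟨c, hc, by simp [hceq]⟩)
    have hF2 : F ≠ 2 := by
      intro h
      obtain ⟨c, hc, hc2⟩ := h2.mp h
      exact hnp c hc ((pvSeverity_eq_two c).mp hc2)
    by_cases hproxy : (tc.any fun c => decide (c = "proxy")) = true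
    · rw [if_pos hproxy]
      obtain ⟨c, hc, hcp⟩ := List.any_eq_true.mp hproxy
      have hcp : c = "proxy" := by simpa using hcp
      have hF0 : F ≠ 0 := by
        intro h
        have := (pvSeverity_eq_zero c).mp (h0.mp h c hc)
        subst hcp
        exact absurd this (by decide)
      have h1 : F = 1 := by omega
      rw [h1]; rfl
    · rw [if_neg hproxy]
      by_cases hadmin : (tc.any fun c => decide (c = "administrative")) = true
      · rw [if_pos hadmin]
        obtain ⟨c, hc, hcp⟩ := List.any_eq_true.mp hadmin
        have hcp : c = "administrative" := by simpa using hcp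
        have hF0 : F ≠ 0 := by
          intro h
          have := (pvSeverity_eq_zero c).mp (h0.mp h c hc)
          subst hcp
          exact absurd this (by decide)
        have h1 : F = 1 := by omega
        rw [h1]; rfl
      · rw [if_neg hadmin]
        have hnadmin : ∀ c ∈ tc, c ≠ "administrative" := by
          intro c hc hceq
          exact hadmin (List.any_eq_true.mpr ⟨c, hc, by simp [hceq]⟩)
        by_cases hlegit : (tc.all fun c =>
            decide (c = "geographic" ∨ c = "clinical" ∨ c = "temporal" ∨ c = "administrative" ∨ c = "other")) = true
        · rw [if_pos hlegit]
          have hF0 : F = 0 := by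
            rw [h0]
            intro c hc
            have := List.all_eq_true.mp hlegit c hc
            rw [pvSeverity_eq_zero]
            have hna := hnadmin c hc
            simp only [decide_eq_true_eq] at this
            tauto
          rw [hF0]; rfl
        · rw [if_neg hlegit]
          have hF0 : F ≠ 0 := by
            intro h
            obtain ⟨c, hc, hcn⟩ := List.all_eq_false.mp (Bool.eq_false_iff.mpr hlegit)
            have := (pvSeverity_eq_zero c).mp (h0.mp h c hc)
            simp only [decide_eq_true_eq] at hcn
            tauto
          have h1 : F = 1 := by omega
          rw [h1]; rfl
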